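-- pv_equiv track=rewrite | github.com/Gemdelle/UB-folder | programación-1/T.P/T.P.03_cifrado.py | addUnderscores
-- ===== SOURCE A (Python) =====
-- def addUnderscores(phrase):
--     VOWELS = 'aeiouAEIOU'
--
--     underscore_array = []
--
--     for i in range(len(phrase)):
--         if i+1 < len(phrase):
--             if phrase[i] in VOWELS and phrase[i+1] not in VOWELS:
--                 underscore_array.append(phrase[i])
--                 underscore_array.append('-')
--             elif phrase[i] not in VOWELS and phrase[i+1] in VOWELS:
--                 underscore_array.append(phrase[i])
--                 underscore_array.append('-')
--             else:
--                 underscore_array.append(phrase[i])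
--         elif i == len(phrase)-1:
--             underscore_array.append(phrase[i])
--
--     return underscore_array
-- ===== SOURCE B (Python) =====
-- def addUnderscores(phrase):
--     VOWELS = set('aeiouAEIOU')
--
--     def runs(cs):
--         # split cs into maximal runs of equal vowel-class
--         groups = []
--         i = 0
--         while i < len(cs):
--             k = cs[i] in VOWELS
--             j = i + 1
--             while j < len(cs) and (cs[j] in VOWELS) == k:
--                 j += 1
--             groups.append(cs[i:j])
--             i = j
--         return groups
--
--     groups = runs(list(phrase))
--     if not groups:
--         return []
--     result = list(groups[0])
--     for g in groups[1:]:
--         result.append('-')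
--         result.extend(g)
--     return result
-- ===== Notes on version B (the rewrite author's own statement) =====
-- stated objective: alternative
-- what changed: Replaced the index-with-lookahead loop and its two boundary branches by a run-grouping pass: split the phrase into maximal runs of equal vowel-class, then emit the runs joined by '-'.
import Mathlib
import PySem

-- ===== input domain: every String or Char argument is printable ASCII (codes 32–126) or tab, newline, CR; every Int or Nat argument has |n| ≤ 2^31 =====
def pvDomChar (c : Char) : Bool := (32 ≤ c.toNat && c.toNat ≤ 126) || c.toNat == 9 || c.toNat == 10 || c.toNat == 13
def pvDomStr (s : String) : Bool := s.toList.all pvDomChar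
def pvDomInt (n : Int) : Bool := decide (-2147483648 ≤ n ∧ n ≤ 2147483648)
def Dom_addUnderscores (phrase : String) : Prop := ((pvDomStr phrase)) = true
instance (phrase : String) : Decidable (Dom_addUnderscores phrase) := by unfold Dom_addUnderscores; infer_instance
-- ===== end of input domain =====

-- Same dash-insertion, computed by grouping maximal runs of equal vowel-class instead of
-- an index-with-lookahead loop (objective: alternative decomposition, same cost).


-- single-character Python string phrase[i]
def pvStr1 (c : Char) : String := String.ofList [c]

-- 'c in VOWELS' for the one-character string phrase[i]: exact, since a length-1 substring
-- of 'aeiouAEIOU' is exactly a member character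
def pvIsVowel (c : Char) : Bool := c ∈ "aeiouAEIOU".toList

-- ===== PORT A =====
def addUnderscores (phrase : String) : List String :=
  (PySem.List.pyRange 0 (PySem.Str.len phrase) 1).foldl (fun acc i =>
    if i + 1 < PySem.Str.len phrase then
      match PySem.Str.pyGet? phrase i, PySem.Str.pyGet? phrase (i + 1) with
      | some c, some d =>
          if pvIsVowel c && !pvIsVowel d then acc ++ [pvStr1 c, "-"]
          else if !pvIsVowel c && pvIsVowel d then acc ++ [pvStr1 c, "-"]
          else acc ++ [pvStr1 c]
      | _, _ => acc      -- unreachable: i and i+1 are in range here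
    else if i = PySem.Str.len phrase - 1 then
      match PySem.Str.pyGet? phrase i with
      | some c => acc ++ [pvStr1 c]
      | none => acc      -- unreachable: i is in range
    else acc) []

-- ===== PORT B =====
-- runs(cs): split into maximal runs of equal vowel-class (the run cs[i:j] and the rest
-- cs[j:] = takeWhile / dropWhile of the same predicate)
def pvRuns : List Char → List (List Char)
  | [] => []
  | c :: cs =>
      (c :: cs.takeWhile (fun d => pvIsVowel d == pvIsVowel c)) ::
        pvRuns (cs.dropWhile (fun d => pvIsVowel d == pvIsVowel c))
termination_by cs => cs.length
decreasing_by
  have := List.length_dropWhile_le (fun d => pvIsVowel d == pvIsVowel c) cs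
  simp only [List.length_cons]; omega

def addUnderscores_alt (phrase : String) : List String :=
  match pvRuns phrase.toList with
  | [] => []
  | g :: rest => g.map pvStr1 ++ rest.flatMap (fun q => "-" :: q.map pvStr1)

-- ===== PRECONDITION & SPEC =====
def Spec_addUnderscores (phrase : String) (out : List String) : Prop := out = addUnderscores_alt phrase
instance (phrase : String) (out : List String) : Decidable (Spec_addUnderscores phrase out) := by unfold Spec_addUnderscores; infer_instance

-- ===== CLAIM (what is proved, stated in full; the proofs are below) =====
def Claim_equal_addUnderscores : Prop := ∀ (phrase : String), Dom_addUnderscores phrase → Spec_addUnderscores phrase (addUnderscores phrase)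

-- ===== LEMMAS AND PROOFS =====

-- middle form: A's per-index output as a function of the char list
def pvGA (cs : List Char) (i : Int) : List String :=
  if i + 1 < (cs.length : Int) then
    match PySem.List.pyGet? cs i, PySem.List.pyGet? cs (i + 1) with
    | some c, some d =>
        if pvIsVowel c && !pvIsVowel d then [pvStr1 c, "-"]
        else if !pvIsVowel c && pvIsVowel d then [pvStr1 c, "-"]
        else [pvStr1 c]
    | _, _ => []
  else if i = (cs.length : Int) - 1 then
    match PySem.List.pyGet? cs i with
    | some c => [pvStr1 c]
    | none => []
  else []

-- middle form: output written by structural recursion over adjacent pairs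
def pvPairs : List Char → List String
  | [] => []
  | [c] => [pvStr1 c]
  | c :: d :: t =>
      (if pvIsVowel c == pvIsVowel d then [pvStr1 c] else [pvStr1 c, "-"]) ++ pvPairs (d :: t)

theorem pvGA_shift (c : Char) (cs : List Char) (k : Nat) :
    pvGA (c :: cs) (((k + 1 : Nat) : Int)) = pvGA cs ((k : Nat) : Int) := by
  have e1 : ((k : Nat) : Int) + 1 = (((k + 1 : Nat)) : Int) := by push_cast; ring
  simp only [pvGA, List.length_cons]
  rw [e1]
  have e2 : (((k + 1 : Nat)) : Int) + 1 = (((k + 2 : Nat)) : Int) := by push_cast; ring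
  rw [e2]
  simp only [PySem.List.pyGet?_natCast, List.getElem?_cons_succ]
  have h1 : ((((k + 2 : Nat)) : Int) < ((cs.length + 1 : Nat) : Int)) ↔ ((((k + 1 : Nat)) : Int) < (cs.length : Int)) := by
    push_cast; omega
  have h2 : ((((k + 1 : Nat)) : Int) = ((cs.length + 1 : Nat) : Int) - 1) ↔ (((k : Nat) : Int) = (cs.length : Int) - 1) := by
    push_cast; omega
  simp only [h1, h2]

theorem pvGA_zero_cons (c : Char) (cs : List Char) :
    pvGA (c :: cs) 0 ++ pvPairs cs = pvPairs (c :: cs) := by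
  cases cs with
  | nil => simp [pvGA, pvPairs]
  | cons d t =>
    have hget : PySem.List.pyGet? (c :: d :: t) ((0 : Int) + 1) = some d := by
      have h := PySem.List.pyGet?_cons_succ (x := c) (xs := d :: t) (n := 0)
      simpa [PySem.List.pyGet?_zero_cons] using h
    simp only [pvGA, List.length_cons, pvPairs]
    rw [if_pos (by push_cast; omega)]
    simp only [PySem.List.pyGet?_zero_cons, hget]
    cases hc : pvIsVowel c <;> cases hd : pvIsVowel d <;> simp

theorem pvA_flat (cs : List Char) :
    (List.range cs.length).flatMap (fun k => pvGA cs ((k : Nat) : Int)) = pvPairs cs := by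
  induction cs with
  | nil => simp [pvPairs]
  | cons c cs ih =>
    rw [List.length_cons, List.range_succ_eq_map]
    simp only [List.flatMap_cons, List.flatMap_map]
    have hs : ∀ k ∈ List.range cs.length,
        pvGA (c :: cs) ((Nat.succ k : Nat) : Int) = pvGA cs ((k : Nat) : Int) := by
      intro k _
      exact pvGA_shift c cs k
    rw [List.flatMap_congr hs, ih]
    have h0 : pvGA (c :: cs) (((0 : Nat) : Int)) = pvGA (c :: cs) 0 := by norm_num
    rw [h0, pvGA_zero_cons]

theorem pvA_eq_pairs (phrase : String) : addUnderscores phrase = pvPairs phrase.toList := by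
  unfold addUnderscores
  have hb : (fun (acc : List String) (i : Int) => if i + 1 < PySem.Str.len phrase then
      match PySem.Str.pyGet? phrase i, PySem.Str.pyGet? phrase (i + 1) with
      | some c, some d =>
          if pvIsVowel c && !pvIsVowel d then acc ++ [pvStr1 c, "-"]
          else if !pvIsVowel c && pvIsVowel d then acc ++ [pvStr1 c, "-"]
          else acc ++ [pvStr1 c]
      | _, _ => acc
    else if i = PySem.Str.len phrase - 1 then
      match PySem.Str.pyGet? phrase i with
      | some c => acc ++ [pvStr1 c]
      | none => acc
    else acc) = fun acc i => acc ++ pvGA phrase.toList i := by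
    funext acc i
    simp only [pvGA, PySem.Str.len_eq, PySem.Str.pyGet?_eq, PySem.Chars.pyGet?_eq_listPyGet?]
    split_ifs with h1 h2
    · rcases PySem.List.pyGet? phrase.toList i with _ | c
      · simp
      · rcases PySem.List.pyGet? phrase.toList (i + 1) with _ | d
        · simp
        · simp only []
          split_ifs <;> simp
    · rcases PySem.List.pyGet? phrase.toList i with _ | c <;> simp
    · simp
  rw [hb, PySem.List.foldl_append_eq_flatMap]
  have h := pvA_flat phrase.toList
  rw [PySem.Str.len_eq, PySem.List.pyRange_one]
  simpa [List.flatMap_map] using h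

-- pvPairs across one maximal run: the run's characters, then '-' iff something follows
theorem pvPairs_run (c : Char) (t d : List Char)
    (ht : ∀ b ∈ t, pvIsVowel b = pvIsVowel c)
    (hd : ∀ x, d.head? = some x → pvIsVowel x ≠ pvIsVowel c) :
    pvPairs (c :: (t ++ d)) = (c :: t).map pvStr1 ++ (if d = [] then [] else "-" :: pvPairs d) := by
  induction t generalizing c with
  | nil =>
    cases d with
    | nil => simp [pvPairs]
    | cons x xs =>
      have hx : pvIsVowel x ≠ pvIsVowel c := hd x rfl
      have hcond : (pvIsVowel c == pvIsVowel x) = false := by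
        cases hvc : pvIsVowel c <;> cases hvx : pvIsVowel x <;> simp_all
      simp [pvPairs, hcond]
  | cons b bs ih =>
    have hb : pvIsVowel b = pvIsVowel c := ht b (by simp)
    have hbs : ∀ y ∈ bs, pvIsVowel y = pvIsVowel b := by
      intro y hy; rw [hb]; exact ht y (by simp [hy])
    have hd' : ∀ x, d.head? = some x → pvIsVowel x ≠ pvIsVowel b := by
      intro x hx; rw [hb]; exact hd x hx
    have hcond : (pvIsVowel c == pvIsVowel b) = true := by simp [hb]
    simp only [List.cons_append, pvPairs, hcond, if_true]
    rw [ih b hbs hd']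
    simp

-- B-side: join the runs with '-' between them
def pvJoin : List (List Char) → List String
  | [] => []
  | g :: rest => g.map pvStr1 ++ rest.flatMap (fun q => "-" :: q.map pvStr1)

theorem pvJoin_runs (cs : List Char) : pvJoin (pvRuns cs) = pvPairs cs := by
  match cs with
  | [] => simp [pvRuns, pvJoin, pvPairs]
  | c :: cs =>
    have hrec := pvJoin_runs (cs.dropWhile (fun d => pvIsVowel d == pvIsVowel c))
    rw [pvRuns]
    simp only [pvJoin]
    have key : (pvRuns (cs.dropWhile (fun d => pvIsVowel d == pvIsVowel c))).flatMap (fun q => "-" :: q.map pvStr1)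
        = if cs.dropWhile (fun d => pvIsVowel d == pvIsVowel c) = [] then []
          else "-" :: pvJoin (pvRuns (cs.dropWhile (fun d => pvIsVowel d == pvIsVowel c))) := by
      cases hd : cs.dropWhile (fun d => pvIsVowel d == pvIsVowel c) with
      | nil => simp [pvRuns]
      | cons x xs => rw [pvRuns]; simp [pvJoin]
    rw [key, hrec]
    have hrun : ∀ b ∈ cs.takeWhile (fun d => pvIsVowel d == pvIsVowel c), pvIsVowel b = pvIsVowel c := by
      intro b hb; simpa using List.mem_takeWhile_imp hb
    have hhead : ∀ x, (cs.dropWhile (fun d => pvIsVowel d == pvIsVowel c)).head? = some x →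
        pvIsVowel x ≠ pvIsVowel c := by
      intro x hx
      have h := List.head?_dropWhile_not (fun d => pvIsVowel d == pvIsVowel c) cs
      rw [hx] at h
      simpa using h
    conv_rhs => rw [show cs = cs.takeWhile (fun d => pvIsVowel d == pvIsVowel c) ++
      cs.dropWhile (fun d => pvIsVowel d == pvIsVowel c) from List.takeWhile_append_dropWhile.symm]
    exact (pvPairs_run c _ _ hrun hhead).symm
termination_by cs.length
decreasing_by
  have := List.length_dropWhile_le (fun d => pvIsVowel d == pvIsVowel c) cs
  simp only [List.length_cons]; omega

theorem pvB_eq_pairs (phrase : String) : addUnderscores_alt phrase = pvPairs phrase.toList := by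
  unfold addUnderscores_alt
  rw [← pvJoin_runs phrase.toList]
  cases pvRuns phrase.toList <;> rfl

-- ===== VERDICT (by name: the statement is the Claim_ definition above) =====
theorem addUnderscores_spec : Claim_equal_addUnderscores := by
  intro phrase _
  unfold Spec_addUnderscores
  rw [pvA_eq_pairs, pvB_eq_pairs]
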